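-- pv_equiv track=rewrite | github.com/Jane-o-O-o-O/MusicGraph | scripts/build_romance_graph.py | group_entities_by_gap
-- ===== SOURCE A (Python) =====
-- def group_entities_by_gap(entities: list[dict], max_gap: int = 500) -> list[list[dict]]:
--     groups: list[list[dict]] = []
--     current_group: list[dict] = []
--
--     for entity in entities:
--         if not current_group:
--             current_group.append(entity)
--         elif entity["start"] - current_group[-1]["end"] < max_gap:
--             current_group.append(entity)
--         else:
--             groups.append(current_group)
--             current_group = [entity]
--
--     if current_group:
--         groups.append(current_group)
--
--     return groups
-- ===== SOURCE B (Python) =====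
-- def group_entities_by_gap(entities: list[dict], max_gap: int = 500) -> list[list[dict]]:
--     n = len(entities)
--     if n == 0:
--         return []
--     groups = []
--     start = 0
--     for i in range(1, n):
--         if entities[i]["start"] - entities[i - 1]["end"] >= max_gap:
--             groups.append(entities[start:i])
--             start = i
--     groups.append(entities[start:])
--     return groups
-- ===== Notes on version B (the rewrite author's own statement) =====
-- stated objective: alternative
-- what changed: B replaces A's accumulate-and-flush current_group fold with an index scan that detects gap boundaries between entities[i-1] and entities[i] and emits each group as a slice entities[start:i] of the input.
import Mathlib
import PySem

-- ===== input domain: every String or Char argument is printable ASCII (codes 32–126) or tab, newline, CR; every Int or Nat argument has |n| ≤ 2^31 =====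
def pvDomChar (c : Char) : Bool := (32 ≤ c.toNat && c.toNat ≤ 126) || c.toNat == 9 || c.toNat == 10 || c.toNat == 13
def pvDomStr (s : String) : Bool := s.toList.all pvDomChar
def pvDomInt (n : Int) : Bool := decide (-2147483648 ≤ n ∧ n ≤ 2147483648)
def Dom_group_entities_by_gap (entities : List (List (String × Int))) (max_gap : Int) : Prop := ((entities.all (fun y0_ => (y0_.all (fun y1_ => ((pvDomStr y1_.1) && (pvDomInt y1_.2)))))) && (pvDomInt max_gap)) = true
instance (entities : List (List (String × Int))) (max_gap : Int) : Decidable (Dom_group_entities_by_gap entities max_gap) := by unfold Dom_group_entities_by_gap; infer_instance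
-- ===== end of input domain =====

-- B replaces A's accumulate-a-current-group fold with an index scan that slices the
-- input at gap boundaries (objective: alternative decomposition, same O(n) cost).
-- Each entity dict is an association list; e["start"] is the first match.
-- pvLookupD e k = e[k] with default 0; the default is only reachable outside Pre_
-- (where Python raises KeyError), so both ports use it to stay total.
def pvLookupD (e : List (String × Int)) (k : String) : Int :=
  ((e.find? (fun p => p.1 == k)).map Prod.snd).getD 0

-- ===== PORT A =====
-- one loop step of A: state = (groups, current_group); current_group[-1] via pyGet?,
-- .getD [] totalizes the (unreachable in that branch) none case
def pvStepA (max_gap : Int)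
    (st : List (List (List (String × Int))) × List (List (String × Int)))
    (entity : List (String × Int)) :
    List (List (List (String × Int))) × List (List (String × Int)) :=
  if st.2.isEmpty then (st.1, st.2 ++ [entity])
  else if pvLookupD entity "start" -
          pvLookupD ((PySem.List.pyGet? st.2 (-1)).getD []) "end" < max_gap then
    (st.1, st.2 ++ [entity])
  else (st.1 ++ [st.2], [entity])

def group_entities_by_gap (entities : List (List (String × Int))) (max_gap : Int) :
    List (List (List (String × Int))) :=
  let st := entities.foldl (pvStepA max_gap) ([], [])
  if st.2.isEmpty then st.1 else st.1 ++ [st.2]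

-- ===== PORT B =====
-- one loop step of B: state = (groups, start); indexing via pyGetD (in range for i ∈ range(1,n))
def pvStepB (entities : List (List (String × Int))) (max_gap : Int)
    (st : List (List (List (String × Int))) × Int) (i : Int) :
    List (List (List (String × Int))) × Int :=
  if pvLookupD (PySem.List.pyGetD entities i []) "start" -
     pvLookupD (PySem.List.pyGetD entities (i - 1) []) "end" ≥ max_gap then
    (st.1 ++ [PySem.List.slice entities (some st.2) (some i)], i)
  else st

def group_entities_by_gap_alt (entities : List (List (String × Int))) (max_gap : Int) :
    List (List (List (String × Int))) :=
  let n : Int := entities.length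
  if entities.isEmpty then [] else
  let st := (PySem.List.pyRange 1 n 1).foldl (pvStepB entities max_gap) ([], 0)
  st.1 ++ [PySem.List.slice entities (some st.2) none]

-- ===== PRECONDITION & SPEC =====
-- Pre_ excludes exactly the inputs where Python A raises KeyError: the loop looks up
-- entities[i]["start"] for every i ≥ 1 and entities[i-1]["end"] for every i ≥ 1,
-- i.e. every entity but the first needs "start" and every entity but the last needs "end".
def Pre_group_entities_by_gap (entities : List (List (String × Int))) (max_gap : Int) : Prop :=
  (∀ e ∈ entities.drop 1, (e.find? (fun p => p.1 == "start")).isSome) ∧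
  (∀ e ∈ entities.dropLast, (e.find? (fun p => p.1 == "end")).isSome)
instance (entities : List (List (String × Int))) (max_gap : Int) : Decidable (Pre_group_entities_by_gap entities max_gap) := by unfold Pre_group_entities_by_gap; infer_instance

def pvWitness_group_entities_by_gap : (List (List (String × Int))) × Int :=
  ([[("start", 0), ("end", 1)], [("start", 900), ("end", 950)]], 500)

def Spec_group_entities_by_gap (entities : List (List (String × Int))) (max_gap : Int) (out : List (List (List (String × Int)))) : Prop := out = group_entities_by_gap_alt entities max_gap
instance (entities : List (List (String × Int))) (max_gap : Int) (out : List (List (List (String × Int)))) : Decidable (Spec_group_entities_by_gap entities max_gap out) := by unfold Spec_group_entities_by_gap; infer_instance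

-- ===== CLAIM (what is proved, stated in full; the proofs are below) =====
def Claim_equal_group_entities_by_gap : Prop := ∀ (entities : List (List (String × Int))) (max_gap : Int), Dom_group_entities_by_gap entities max_gap → Pre_group_entities_by_gap entities max_gap → Spec_group_entities_by_gap entities max_gap (group_entities_by_gap entities max_gap)

-- ===== LEMMAS AND PROOFS =====

-- loop invariant: after processing the first k elements (k ≥ 1), A's state is
-- (gs, current) where B's range-fold over range(1,k) is (gs, s) and
-- current = (entities.take k).drop s with s < k.
lemma pvInv (entities : List (List (String × Int))) (max_gap : Int) :
    ∀ (k : Nat), 1 ≤ k → k ≤ entities.length →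
    ∃ (gs : List (List (List (String × Int)))) (s : Nat), (PySem.List.pyRange 1 (k : Int) 1).foldl (pvStepB entities max_gap) ([], 0)
              = (gs, (s : Int)) ∧ s < k ∧
      (entities.take k).foldl (pvStepA max_gap) ([], []) = (gs, (entities.take k).drop s) := by
  intro k
  induction k with
  | zero => intro h; omega
  | succ k ih =>
    intro _ hlen
    by_cases hk : k = 0
    · subst hk
      refine ⟨[], 0, ?_, by omega, ?_⟩
      · simp
      · obtain ⟨e, rest, rfl⟩ : ∃ e rest, entities = e :: rest := by
          cases entities with
          | nil => simp at hlen
          | cons e rest => exact ⟨e, rest, rfl⟩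
        simp [pvStepA]
    · have hk1 : 1 ≤ k := by omega
      have hklen : k < entities.length := by omega
      obtain ⟨gs, s, hB, hs, hA⟩ := ih hk1 (by omega)
      have hcast : ((k + 1 : Nat) : Int) = (k : Int) + 1 := by push_cast; ring
      have hrange : PySem.List.pyRange 1 ((k + 1 : Nat) : Int) 1
          = PySem.List.pyRange 1 (k : Int) 1 ++ [(k : Int)] := by
        rw [hcast]
        exact PySem.List.pyRange_one_succ_right (by exact_mod_cast hk1)
      have htake : entities.take (k + 1) = entities.take k ++ [entities[k]] := by
        rw [List.take_add_one, List.getElem?_eq_getElem hklen]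
        rfl
      set cur := (entities.take k).drop s with hcur
      have hcurlen : cur.length = k - s := by
        simp [hcur, List.length_take]
        omega
      have hne : cur.isEmpty = false := by
        rw [List.isEmpty_eq_false_iff_exists_mem]
        have h0 : 0 < cur.length := by omega
        exact ⟨cur[0], List.getElem_mem h0⟩
      have hlast : cur.getLast? = some entities[k - 1] := by
        have h0 : cur.getLast? = cur[cur.length - 1]? := List.getLast?_eq_getElem?
        rw [h0, hcurlen]
        have : (k - s - 1) + s = k - 1 := by omega
        rw [List.getElem?_drop, List.getElem?_take_of_lt (by omega)]
        rw [show s + (k - s - 1) = k - 1 by omega]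
        exact List.getElem?_eq_getElem (by omega)
      have hEk : PySem.List.pyGetD entities ((k : Nat) : Int) ([] : List (String × Int))
          = entities[k] := PySem.List.pyGetD_ofNat entities k _ hklen
      have hEk1 : PySem.List.pyGetD entities (((k : Nat) : Int) - 1) ([] : List (String × Int))
          = entities[k - 1] := by
        rw [show ((k : Nat) : Int) - 1 = ((k - 1 : Nat) : Int) by omega]
        exact PySem.List.pyGetD_ofNat entities (k-1) _ (by omega)
      have hAstep : (entities.take (k + 1)).foldl (pvStepA max_gap) ([], [])
          = pvStepA max_gap (gs, cur) entities[k] := by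
        rw [htake, List.foldl_append, hA]
        rfl
      have hBstep : (PySem.List.pyRange 1 ((k + 1 : Nat) : Int) 1).foldl
            (pvStepB entities max_gap) ([], 0)
          = pvStepB entities max_gap (gs, (s : Int)) (k : Int) := by
        rw [hrange, List.foldl_append, hB]
        rfl
      by_cases hc : pvLookupD entities[k] "start" - pvLookupD entities[k - 1] "end" < max_gap
      · refine ⟨gs, s, ?_, by omega, ?_⟩
        · rw [hBstep]
          simp only [pvStepB, hEk, hEk1]
          rw [if_neg (by omega)]
        · rw [hAstep]
          simp only [pvStepA, hne, Bool.false_eq_true, if_false,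
            PySem.List.pyGet?_neg_one, hlast, Option.getD_some]
          rw [if_pos hc]
          have : (entities.take (k + 1)).drop s = cur ++ [entities[k]] := by
            rw [htake, List.drop_append_of_le_length (by simp [List.length_take]; omega)]
          rw [this]
      · refine ⟨gs ++ [cur], k, ?_, by omega, ?_⟩
        · rw [hBstep]
          simp only [pvStepB, hEk, hEk1]
          rw [if_pos (by omega)]
          have : PySem.List.slice entities (some ((s : Nat) : Int)) (some ((k : Nat) : Int))
              = cur := by
            rw [PySem.List.slice_natCast, hcur, List.drop_take]
          rw [this]
        · rw [hAstep]
          simp only [pvStepA, hne, Bool.false_eq_true, if_false,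
            PySem.List.pyGet?_neg_one, hlast, Option.getD_some]
          rw [if_neg hc]
          have : (entities.take (k + 1)).drop k = [entities[k]] := by
            rw [htake, List.drop_append_of_le_length (by simp [List.length_take]; omega)]
            simp [List.drop_of_length_le, List.length_take]
          rw [this]

-- ===== VERDICT (by name: the statement is the Claim_ definition above) =====
theorem group_entities_by_gap_spec : Claim_equal_group_entities_by_gap := by
  intro entities max_gap _ _
  unfold Spec_group_entities_by_gap group_entities_by_gap group_entities_by_gap_alt
  cases entities with
  | nil => rfl
  | cons e rest =>
    obtain ⟨gs, s, hB, hs, hA⟩ :=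
      pvInv (e :: rest) max_gap (e :: rest).length (by simp) le_rfl
    rw [List.take_length] at hA
    dsimp only
    rw [hA, hB]
    have h1 : ((e :: rest).drop s).isEmpty = false := by
      simp only [List.isEmpty_eq_false_iff, ne_eq, List.drop_eq_nil_iff]
      omega
    rw [h1]
    rw [show (e :: rest).isEmpty = false from rfl]
    simp only [Bool.false_eq_true, if_false]
    rw [PySem.List.slice_from_natCast]
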